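-- pv_equiv track=rewrite | github.com/daniel-reich/turbo-robot | WixXhsdqcNHe3vTn3_11.py | how_bad
-- ===== SOURCE A (Python) =====
-- def how_bad(n):
--   def isPrime(n:int) -> bool:
--     #returns true if input is prime number, false otherwise
--     #horribly ineffective
--     if n==1:
--       return False
--     return not any([c for c in range(2,n) if n%c==0])
--   nb=str(bin(n)).count('1')
--   r=[]
--   if nb%2==0:
--     r.append('Evil')
--   else:
--     r.append('Odious')
--   if isPrime(nb):
--     r.append('Pernicious')
--   return list(sorted(r))
-- ===== SOURCE B (Python) =====
-- def how_bad(n):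
--     # popcount via bit loop instead of string counting
--     m = abs(n)
--     nb = 0
--     while m:
--         nb += m & 1
--         m >>= 1
--     labels = ['Evil'] if nb % 2 == 0 else ['Odious']
--     # sqrt-bounded trial division (nb==0 vacuously passes, matching A)
--     if nb != 1:
--         c = 2
--         prime = True
--         while c * c <= nb:
--             if nb % c == 0:
--                 prime = False
--                 break
--             c += 1
--         if prime:
--             labels.append('Pernicious')
--     return labels
-- ===== Notes on version B (the rewrite author's own statement) =====
-- stated objective: alternative
-- what changed: B counts bits with an arithmetic shift loop instead of counting '1' characters in bin(n)'s string, tests primality of the bit count by sqrt-bounded trial division instead of scanning the whole range(2,nb), and builds the labels directly in sorted order instead of calling sorted().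
import Mathlib
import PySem

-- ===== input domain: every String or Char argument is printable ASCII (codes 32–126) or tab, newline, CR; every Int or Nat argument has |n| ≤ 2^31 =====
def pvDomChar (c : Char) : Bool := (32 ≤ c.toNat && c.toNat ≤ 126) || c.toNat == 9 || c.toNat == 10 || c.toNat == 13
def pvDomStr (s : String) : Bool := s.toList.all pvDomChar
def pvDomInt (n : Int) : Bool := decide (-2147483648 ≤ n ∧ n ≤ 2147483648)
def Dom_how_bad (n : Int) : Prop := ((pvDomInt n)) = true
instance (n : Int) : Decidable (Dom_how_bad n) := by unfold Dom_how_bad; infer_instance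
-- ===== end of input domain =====

-- B counts bits with a shift loop instead of bin(n)-string character counting, tests primality
-- of the bit count by sqrt-bounded trial division instead of a full range(2,n) scan, and omits
-- the sort (the labels are appended in sorted order already).

-- ===== PORT A =====
-- digits of bin(m) for m : Nat (the '0b'/'-' prefix of Python's bin contains no '1',
-- so counting '1' over these digit characters equals str(bin(n)).count('1'))
def pvBinAux (m : Nat) : List Char :=
  if h : m = 0 then [] else pvBinAux (m / 2) ++ [if m % 2 == 1 then '1' else '0']
  decreasing_by exact Nat.div_lt_self (Nat.pos_of_ne_zero h) (by norm_num)

def pvBinDigits (m : Nat) : List Char := if m = 0 then ['0'] else pvBinAux m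

-- inner isPrime of A: n==1 -> False; else not any([c for c in range(2,n) if n%c==0])
def pvIsPrimeA (n : Int) : Bool :=
  if n == 1 then false
  else !(((PySem.List.pyRange 2 n 1).filter (fun c => PySem.Int.mod n c == 0)).any (fun c => c != 0))

def how_bad (n : Int) : List String :=
  let nb : Int := Int.ofNat ((pvBinDigits n.natAbs).count '1')
  let r : List String := if PySem.Int.mod nb 2 == 0 then ["Evil"] else ["Odious"]
  let r := if pvIsPrimeA nb then r ++ ["Pernicious"] else r
  PySem.List.sorted r (fun s => s) false

-- ===== PORT B =====
-- while m: nb += m & 1; m >>= 1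
def pvPopc (m : Nat) : Nat :=
  if h : m = 0 then 0 else m % 2 + pvPopc (m / 2)
  decreasing_by exact Nat.div_lt_self (Nat.pos_of_ne_zero h) (by norm_num)

-- while c*c <= k loop; fuel k+1 is enough: the loop runs only while c*c ≤ k, i.e. c ≤ k
def pvTrialFuel : Nat → Nat → Nat → Bool
  | 0, _, _ => true
  | f + 1, k, c => if c * c ≤ k then (if k % c = 0 then false else pvTrialFuel f k (c + 1)) else true

def pvTrial (k c : Nat) : Bool := pvTrialFuel (k + 1) k c

def how_bad_alt (n : Int) : List String :=
  let nb := pvPopc n.natAbs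
  let labels : List String := if nb % 2 == 0 then ["Evil"] else ["Odious"]
  if nb ≠ 1 ∧ pvTrial nb 2 = true then labels ++ ["Pernicious"] else labels

-- ===== PRECONDITION & SPEC =====
def Spec_how_bad (n : Int) (out : List String) : Prop := out = how_bad_alt n
instance (n : Int) (out : List String) : Decidable (Spec_how_bad n out) := by unfold Spec_how_bad; infer_instance

-- ===== CLAIM (what is proved, stated in full; the proofs are below) =====
def Claim_equal_how_bad : Prop := ∀ (n : Int), Dom_how_bad n → Spec_how_bad n (how_bad n)

-- ===== LEMMAS AND PROOFS =====

-- the two bit counts agree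
theorem count_binAux (m : Nat) : (pvBinAux m).count '1' = pvPopc m := by
  induction m using Nat.strong_induction_on with
  | _ m ih =>
    rw [pvBinAux, pvPopc]
    by_cases h : m = 0
    · simp [h]
    · simp only [h, dite_false]
      rw [List.count_append]
      rw [ih (m / 2) (Nat.div_lt_self (Nat.pos_of_ne_zero h) (by norm_num))]
      have h2 : m % 2 = 0 ∨ m % 2 = 1 := by omega
      rcases h2 with h2 | h2 <;> simp [h2, Nat.add_comm]

theorem count_binDigits (m : Nat) : (pvBinDigits m).count '1' = pvPopc m := by
  unfold pvBinDigits
  by_cases h : m = 0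
  · simp [h, pvPopc]
  · simp [h, count_binAux]

-- popcount is bounded by the bit width
theorem popc_le (k : Nat) : ∀ m, m < 2 ^ k → pvPopc m ≤ k := by
  induction k with
  | zero => intro m hm; interval_cases m; simp [pvPopc]
  | succ k ih =>
    intro m hm
    rw [pvPopc]
    by_cases h : m = 0
    · simp [h]
    · simp only [h, dite_false]
      have hd : m / 2 < 2 ^ k := by
        have := Nat.pow_succ 2 k
        omega
      have := ih (m / 2) hd
      omega

-- the two primality tests agree on every bit count a 32-bit input can produce
theorem prime_eq : ∀ nb ≤ 32,
    pvIsPrimeA (Int.ofNat nb) = decide (nb ≠ 1 ∧ pvTrial nb 2 = true) := by decide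

-- the two parity tests agree there too
theorem parity_eq : ∀ nb ≤ 32,
    (PySem.Int.mod (Int.ofNat nb) 2 == 0) = (nb % 2 == 0) := by decide

-- the four possible label lists are already sorted
theorem sorted_E : PySem.List.sorted (["Evil"] : List String) (fun s => s) false = ["Evil"] := by
  simp [PySem.List.sorted, PySem.List.insertBy]
theorem sorted_O : PySem.List.sorted (["Odious"] : List String) (fun s => s) false = ["Odious"] := by
  simp [PySem.List.sorted, PySem.List.insertBy]
theorem sorted_EP : PySem.List.sorted (["Evil", "Pernicious"] : List String) (fun s => s) false
    = ["Evil", "Pernicious"] := by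
  simp [PySem.List.sorted, PySem.List.insertBy]; decide
theorem sorted_OP : PySem.List.sorted (["Odious", "Pernicious"] : List String) (fun s => s) false
    = ["Odious", "Pernicious"] := by
  simp [PySem.List.sorted, PySem.List.insertBy]; decide

-- ===== VERDICT (by name: the statement is the Claim_ definition above) =====
theorem how_bad_spec : Claim_equal_how_bad := by
  intro n hdom
  unfold Spec_how_bad
  simp only [how_bad, how_bad_alt]
  rw [count_binDigits]
  have hb : n.natAbs < 2 ^ 32 := by
    have : -2147483648 ≤ n ∧ n ≤ 2147483648 := by
      simpa [Dom_how_bad, pvDomInt] using hdom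
    omega
  have hnb : pvPopc n.natAbs ≤ 32 := popc_le 32 n.natAbs hb
  rw [parity_eq _ hnb, prime_eq _ hnb]
  by_cases hp : pvPopc n.natAbs ≠ 1 ∧ pvTrial (pvPopc n.natAbs) 2 = true <;>
    by_cases hq : pvPopc n.natAbs % 2 == 0 <;>
      simp [hp, hq, sorted_E, sorted_O, sorted_EP, sorted_OP]
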